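-- pv_equiv track=rewrite | github.com/sinsenti/DSA | Graphs/bfs/result.py | bfs
-- ===== SOURCE A (Python) =====
-- from collections import deque
--
-- def bfs(matrix):
--     n = len(matrix)
--     labels = [0] * (n + 1)
--     visited = [False] * (n + 1)
--     next_label = 1
--
--     def bfs_from(start_vertex, current_label):
--         queue = deque([start_vertex])
--         visited[start_vertex] = True
--         labels[start_vertex] = current_label
--         current_label += 1
--
--         while queue:
--             current = queue.popleft()
--
--             neighbors = []
--             for neighbor in range(1, n + 1):
--                 if matrix[current - 1][neighbor - 1] == 1 and not visited[neighbor]: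
--                     neighbors.append(neighbor)
--
--             neighbors.sort()
--
--             for neighbor in neighbors:
--                 if not visited[neighbor]:
--                     visited[neighbor] = True
--                     labels[neighbor] = current_label
--                     current_label += 1
--                     queue.append(neighbor)
--
--         return current_label
--
--     for vertex in range(1, n + 1):
--         if not visited[vertex]:
--             next_label = bfs_from(vertex, next_label)
--
--     return labels[1:]
-- ===== SOURCE B (Python) =====
-- def bfs(matrix):
--     n = len(matrix)
--     seen = set()
--     order = []
--     for start in range(1, n + 1):
--         if start not in seen:
--             seen.add(start)
--             order.append(start)
--             frontier = [start]
--             while frontier: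
--                 nxt = []
--                 for cur in frontier:
--                     for u in range(1, n + 1):
--                         if matrix[cur - 1][u - 1] == 1 and u not in seen:
--                             seen.add(u)
--                             nxt.append(u)
--                 order.extend(nxt)
--                 frontier = nxt
--     label = {v: i + 1 for i, v in enumerate(order)}
--     return [label[v] for v in range(1, n + 1)]
-- ===== Notes on version B (the rewrite author's own statement) =====
-- stated objective: alternative
-- what changed: B replaces A's vertex-at-a-time deque BFS that mutates a labels array during traversal by a level-synchronous frontier sweep (whole frontier expanded per iteration, no queue, no sort, no per-vertex label writes) that only records the visit order, assigning all labels afterwards from a dict built by enumerate(order).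
import Mathlib
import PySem

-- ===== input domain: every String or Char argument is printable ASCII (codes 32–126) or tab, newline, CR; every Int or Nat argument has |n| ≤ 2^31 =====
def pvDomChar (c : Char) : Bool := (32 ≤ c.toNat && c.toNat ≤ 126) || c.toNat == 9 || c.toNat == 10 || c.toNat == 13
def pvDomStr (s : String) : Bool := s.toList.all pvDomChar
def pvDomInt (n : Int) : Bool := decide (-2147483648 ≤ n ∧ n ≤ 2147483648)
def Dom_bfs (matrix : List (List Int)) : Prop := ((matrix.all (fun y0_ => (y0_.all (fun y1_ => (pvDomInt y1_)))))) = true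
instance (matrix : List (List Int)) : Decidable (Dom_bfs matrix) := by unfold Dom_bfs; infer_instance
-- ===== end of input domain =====

-- B replaces A's one-at-a-time deque BFS that mutates a label array as it visits by a
-- level-synchronous frontier sweep that only records the visit order, assigning all labels
-- afterwards from enumerate(order). Return value only: neither program mutates its argument.

-- ===== PORT A =====
-- BFS state: (visited, labels, next_label, queue).
-- Body of A's inner 'for neighbor in neighbors: if not visited[neighbor]: …'; the in-range
-- conjunct only totalizes Python's visited[neighbor] indexing (never out of range in a real
-- run: neighbors ∈ 1..n and len(visited) = n+1).
def bfsMarkA (st : List Bool × List Int × Int × List Int) (nb : Int) :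
    List Bool × List Int × Int × List Int :=
  if nb.toNat < st.1.length ∧ st.1.getD nb.toNat false = false then
    (st.1.set nb.toNat true, st.2.1.set nb.toNat st.2.2.1, st.2.2.1 + 1, st.2.2.2 ++ [nb])
  else st

-- A's local 'neighbors' list: collected over range(1, n+1), then (redundantly) sorted.
-- Indices current-1 and neighbor-1 are ≥ 0 here; getD is Python's indexing under Pre_.
def bfsNbrsA (matrix : List (List Int)) (n : Int) (visited : List Bool) (cur : Int) :
    List Int :=
  PySem.List.sorted ((PySem.List.pyRange 1 (n+1) 1).foldl (fun acc nb =>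
      if (matrix.getD (cur-1).toNat []).getD (nb-1).toNat 0 = 1 ∧
         visited.getD nb.toNat false = false
      then acc ++ [nb] else acc) []) (fun x => x)

-- termination facts for A's while-loop (cited by decreasing_by below)
theorem bfsMarkA_measure (st : List Bool × List Int × Int × List Int) (nb : Int) :
    (bfsMarkA st nb).1.count false + (bfsMarkA st nb).2.2.2.length ≤
      st.1.count false + st.2.2.2.length ∧
    st.2.2.2.length ≤ (bfsMarkA st nb).2.2.2.length := by
  unfold bfsMarkA
  split
  next h =>
    obtain ⟨hlt, hfalse⟩ := h
    have hget : st.1[nb.toNat] = false := by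
      rw [List.getD_eq_getElem?_getD, List.getElem?_eq_getElem hlt] at hfalse
      simpa using hfalse
    have hc := List.count_set (a := true) (b := false) (l := st.1) (i := nb.toNat) hlt
    rw [hget] at hc
    simp at hc
    have hpos : 0 < st.1.count false := List.count_pos_iff.mpr (hget ▸ List.getElem_mem hlt)
    simp [hc]
    omega
  next h => simp

theorem bfsFoldMarkA_measure (nbs : List Int) (st : List Bool × List Int × Int × List Int) :
    (nbs.foldl bfsMarkA st).1.count false + (nbs.foldl bfsMarkA st).2.2.2.length ≤
      st.1.count false + st.2.2.2.length ∧
    st.2.2.2.length ≤ (nbs.foldl bfsMarkA st).2.2.2.length := by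
  induction nbs generalizing st with
  | nil => simp
  | cons u t ih =>
    simp only [List.foldl_cons]
    have h1 := bfsMarkA_measure st u
    have h2 := ih (bfsMarkA st u)
    omega

-- the closure bfs_from's 'while queue:' loop (queue is A's deque: pop at the head)
def bfsLoopA (matrix : List (List Int)) (n : Int) (queue : List Int)
    (visited : List Bool) (labels : List Int) (label : Int) :
    List Bool × List Int × Int :=
  match queue with
  | [] => (visited, labels, label)
  | cur :: rest =>
    let st := (bfsNbrsA matrix n visited cur).foldl bfsMarkA (visited, labels, label, rest)
    bfsLoopA matrix n st.2.2.2 st.1 st.2.1 st.2.2.1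
termination_by visited.count false + queue.length
decreasing_by
  have h := bfsFoldMarkA_measure (bfsNbrsA matrix n visited cur) (visited, labels, label, rest)
  simp only [List.length_cons] at *
  omega

def bfsFromA (matrix : List (List Int)) (n : Int) (visited : List Bool) (labels : List Int)
    (start label : Int) : List Bool × List Int × Int :=
  bfsLoopA matrix n [start] (visited.set start.toNat true) (labels.set start.toNat label)
    (label + 1)

def bfs (matrix : List (List Int)) : List Int :=
  let n : Int := matrix.length
  let fin := (PySem.List.pyRange 1 (n+1) 1).foldl (fun st v =>
      if st.1.getD v.toNat false = false then bfsFromA matrix n st.1 st.2.1 v st.2.2 else st)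
    (List.replicate (matrix.length + 1) false, List.replicate (matrix.length + 1) 0, 1)
  PySem.List.slice fin.2.1 (some 1) none

-- ===== PORT B =====
-- body of B's 'for cur in frontier: for u in range(1, n+1): …' for ONE cur;
-- state is (seen, nxt).  'u not in seen' / 'seen.add(u)' on the Python set.
def bStep (matrix : List (List Int)) (n : Int) (st : PySem.Set Int × List Int) (cur : Int) :
    PySem.Set Int × List Int :=
  (PySem.List.pyRange 1 (n+1) 1).foldl (fun st u =>
    if (matrix.getD (cur-1).toNat []).getD (u-1).toNat 0 = 1 ∧ u ∉ st.1 then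
      (PySem.Set.add st.1 u, st.2 ++ [u])
    else st) st

-- termination facts for B's 'while frontier:' loop (cited by decreasing_by below)
theorem pv_countP_lt {α : Type} (l : List α) (p q : α → Bool)
    (h : ∀ a ∈ l, p a = true → q a = true) (x : α) (hx : x ∈ l)
    (hp : p x = false) (hq : q x = true) : l.countP p < l.countP q := by
  induction l with
  | nil => simp at hx
  | cons a t ih =>
    simp only [List.countP_cons]
    rcases List.mem_cons.mp hx with rfl | hxt
    · have hmono := List.countP_mono_left (l := t) (p := p) (q := q)
        (fun y hy => h y (List.mem_cons_of_mem _ hy))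
      simp [hp, hq]
      omega
    · have := ih (fun y hy => h y (List.mem_cons_of_mem _ hy)) hxt
      by_cases hpa : p a = true
      · have hqa := h a (List.mem_cons_self) hpa
        simp [hpa, hqa]; omega
      · simp only [Bool.not_eq_true] at hpa
        simp [hpa]
        split <;> omega

theorem bStepFold_grow (matrix : List (List Int)) (n : Int) :
    ∀ (F : List Int) (seen acc : List Int),
      ∃ δ, F.foldl (bStep matrix n) (seen, acc) = (seen ++ δ, acc ++ δ) ∧
        ∀ x ∈ δ, 1 ≤ x ∧ x < n + 1 ∧ x ∉ seen := by
  have inner : ∀ (cur : Int) (L : List Int) (seen acc : List Int),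
      (∀ u ∈ L, 1 ≤ u ∧ u < n + 1) →
      ∃ δ, L.foldl (fun st u =>
          if (matrix.getD (cur-1).toNat []).getD (u-1).toNat 0 = 1 ∧ u ∉ st.1 then
            (PySem.Set.add st.1 u, st.2 ++ [u])
          else st) (seen, acc) = (seen ++ δ, acc ++ δ) ∧
        ∀ x ∈ δ, 1 ≤ x ∧ x < n + 1 ∧ x ∉ seen := by
    intro cur L
    induction L with
    | nil => intro seen acc _; exact ⟨[], by simp⟩
    | cons u t ih =>
      intro seen acc hb
      simp only [List.foldl_cons]
      by_cases hg : (matrix.getD (cur-1).toNat []).getD (u-1).toNat 0 = 1 ∧ u ∉ seen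
      · rw [if_pos hg, PySem.Set.add_of_not_mem hg.2]
        obtain ⟨δ, heq, hδ⟩ := ih (seen ++ [u]) (acc ++ [u])
          (fun v hv => hb v (List.mem_cons_of_mem _ hv))
        refine ⟨u :: δ, ?_, ?_⟩
        · simpa [List.append_assoc] using heq
        · intro x hx
          rcases List.mem_cons.mp hx with rfl | hxδ
          · exact ⟨(hb x List.mem_cons_self).1, (hb x List.mem_cons_self).2, hg.2⟩
          · have := hδ x hxδ
            exact ⟨this.1, this.2.1, fun hxs => this.2.2 (by simp [hxs])⟩
      · rw [if_neg hg]
        exact ih seen acc (fun v hv => hb v (List.mem_cons_of_mem _ hv))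
  intro F
  induction F with
  | nil => intro seen acc; exact ⟨[], by simp⟩
  | cons c F ih =>
    intro seen acc
    simp only [List.foldl_cons]
    obtain ⟨δ₁, heq₁, hδ₁⟩ := inner c (PySem.List.pyRange 1 (n+1) 1) seen acc
      (fun u hu => PySem.List.mem_pyRange_one.mp hu)
    rw [show bStep matrix n (seen, acc) c = (seen ++ δ₁, acc ++ δ₁) from heq₁]
    obtain ⟨δ₂, heq₂, hδ₂⟩ := ih (seen ++ δ₁) (acc ++ δ₁)
    refine ⟨δ₁ ++ δ₂, by simpa [List.append_assoc] using heq₂, ?_⟩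
    intro x hx
    rcases List.mem_append.mp hx with hx1 | hx2
    · exact hδ₁ x hx1
    · have := hδ₂ x hx2
      exact ⟨this.1, this.2.1, fun hxs => this.2.2 (by simp [hxs])⟩

-- B's 'while frontier:' loop: process the whole frontier, extend order, recurse on nxt
def bLevels (matrix : List (List Int)) (n : Int) :
    PySem.Set Int → List Int → List Int → PySem.Set Int × List Int
  | seen, order, [] => (seen, order)
  | seen, order, c :: F =>
    let st := (c :: F).foldl (bStep matrix n) (seen, ([] : List Int))
    bLevels matrix n st.1 (order ++ st.2) st.2
termination_by seen _ frontier =>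
  2 * ((PySem.List.pyRange 1 (n+1) 1).countP (fun v => decide (v ∉ seen))) +
    min frontier.length 1
decreasing_by
  obtain ⟨δ, heq, hδ⟩ := bStepFold_grow matrix n (c :: F) seen []
  simp only [heq]
  cases δ with
  | nil => simp
  | cons x δ' =>
    have hx := hδ x List.mem_cons_self
    have hlt : (PySem.List.pyRange 1 (n+1) 1).countP
          (fun v => decide (v ∉ seen ++ x :: δ')) <
        (PySem.List.pyRange 1 (n+1) 1).countP (fun v => decide (v ∉ seen)) := by
      apply pv_countP_lt _ _ _ _ x
      · exact PySem.List.mem_pyRange_one.mpr ⟨hx.1, hx.2.1⟩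
      · simp
      · simpa using hx.2.2
      · intro a _ ha
        simp only [decide_eq_true_eq] at ha ⊢
        exact fun h => ha (by simp [h])
    simp only [List.length_cons]
    omega

def bfs_alt (matrix : List (List Int)) : List Int :=
  let n : Int := matrix.length
  let fin := (PySem.List.pyRange 1 (n+1) 1).foldl (fun st start =>
      if start ∈ st.1 then st
      else bLevels matrix n (PySem.Set.add st.1 start) (st.2 ++ [start]) [start])
    ((PySem.Set.empty : PySem.Set Int), ([] : List Int))
  -- label = {v: i+1 for i, v in enumerate(order)}; label[v] — the key is always present
  -- (the outer loop visits every vertex 1..n), getD 0 is exact there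
  let label := (PySem.List.enumerate fin.2).foldl
    (fun d p => d.insert p.2 (p.1 + 1)) (PySem.Dict.empty : PySem.Dict Int Int)
  (PySem.List.pyRange 1 (n+1) 1).map (fun v => label.getD v 0)

-- ===== PRECONDITION & SPEC =====
-- Pre_ excludes exactly the matrices with a row shorter than the number of rows, on which
-- Python A raises IndexError (matrix[current-1][neighbor-1]).
def Pre_bfs (matrix : List (List Int)) : Prop := ∀ row ∈ matrix, matrix.length ≤ row.length
instance (matrix : List (List Int)) : Decidable (Pre_bfs matrix) := by
  unfold Pre_bfs; infer_instance
def pvWitness_bfs : List (List Int) := [[0, 1], [1, 0]]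

def Spec_bfs (matrix : List (List Int)) (out : List Int) : Prop := out = bfs_alt matrix
instance (matrix : List (List Int)) (out : List Int) : Decidable (Spec_bfs matrix out) := by
  unfold Spec_bfs; infer_instance

-- ===== CLAIM (what is proved, stated in full; the proofs are below) =====
def Claim_equal_bfs : Prop :=
  ∀ (matrix : List (List Int)), Dom_bfs matrix → Pre_bfs matrix → Spec_bfs matrix (bfs matrix)

-- ===== LEMMAS AND PROOFS =====

-- 1-based label of u in the visit order P (0 if unvisited): what A's labels array holds
def posOf (P : List Int) (u : Int) : Int := if u ∈ P then (P.idxOf u : Int) + 1 else 0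

-- abstraction maps: A's visited / labels arrays as functions of B's seen / order
def mkV (N : Nat) (seen : List Int) : List Bool :=
  (List.range (N+1)).map (fun (i : Nat) => decide ((i : Int) ∈ seen))
def mkL (N : Nat) (P : List Int) : List Int :=
  (List.range (N+1)).map (fun (i : Nat) => posOf P (i : Int))

-- B's inner marking step on adjacency-filtered lists (proof intermediate)
def hB (st : PySem.Set Int × List Int) (u : Int) : PySem.Set Int × List Int :=
  if u ∈ st.1 then st else (st.1 ++ [u], st.2 ++ [u])

-- the ascending list of still-relevant neighbours of cur (matrix cells exactly 1)
def adjL (matrix : List (List Int)) (n : Int) (cur : Int) : List Int :=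
  (PySem.List.pyRange 1 (n+1) 1).filter
    (fun u => decide ((matrix.getD (cur-1).toNat []).getD (u-1).toNat 0 = 1))

-- A's per-pop processing folded over a whole frontier (proof intermediate)
def popFold (matrix : List (List Int)) (n : Int) (F : List Int)
    (st : List Bool × List Int × Int × List Int) : List Bool × List Int × Int × List Int :=
  F.foldl (fun st cur => (bfsNbrsA matrix n st.1 cur).foldl bfsMarkA st) st

theorem posOf_nil (u : Int) : posOf [] u = 0 := by simp [posOf]

theorem posOf_append_self (P : List Int) (u : Int) (h : u ∉ P) :
    posOf (P ++ [u]) u = (P.length : Int) + 1 := by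
  simp [posOf, List.idxOf_append, h]

theorem posOf_append_ne (P : List Int) (u x : Int) (h : x ≠ u) :
    posOf (P ++ [u]) x = posOf P x := by
  by_cases hx : x ∈ P
  · simp [posOf, List.idxOf_append, hx]
  · have : x ∉ P ++ [u] := by simp [hx, h]
    simp [posOf, hx, this]

theorem mkV_length (N : Nat) (seen : List Int) : (mkV N seen).length = N + 1 := by
  simp [mkV]

theorem mkL_length (N : Nat) (P : List Int) : (mkL N P).length = N + 1 := by
  simp [mkL]

theorem mkV_getD (N : Nat) (seen : List Int) (u : Int) (h1 : 1 ≤ u) (h2 : u ≤ (N : Int)) :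
    (mkV N seen).getD u.toNat false = decide (u ∈ seen) := by
  have hlt : u.toNat < N + 1 := by omega
  have hcast : (u.toNat : Int) = u := by omega
  unfold mkV
  have hlen : u.toNat <
      ((List.range (N+1)).map (fun (i : Nat) => decide ((i : Int) ∈ seen))).length := by
    rw [List.length_map, List.length_range]; exact hlt
  rw [List.getD_eq_getElem?_getD, List.getElem?_eq_getElem hlen, Option.getD_some,
    List.getElem_map, List.getElem_range, hcast]

theorem mkV_set (N : Nat) (seen : List Int) (u : Int) (h1 : 1 ≤ u) (_h2 : u ≤ (N : Int)) :
    (mkV N seen).set u.toNat true = mkV N (seen ++ [u]) := by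
  unfold mkV
  apply List.ext_getElem
  · simp
  intro i hi1 hi2
  simp only [List.length_map, List.length_range] at hi2
  rw [List.getElem_set]
  simp only [List.getElem_map, List.getElem_range]
  by_cases hiu : u.toNat = i
  · have hc : (i : Int) = u := by omega
    rw [if_pos hiu, hc]
    have : u ∈ seen ++ [u] := by simp
    simp [this]
  · have hc : (i : Int) ≠ u := by omega
    rw [if_neg hiu]
    have : ((i : Int) ∈ seen ++ [u]) ↔ ((i : Int) ∈ seen) := by simp [List.mem_append, hc]
    simp [this]

theorem mkL_set (N : Nat) (P : List Int) (u : Int) (h1 : 1 ≤ u) (_h2 : u ≤ (N : Int))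
    (hu : u ∉ P) :
    (mkL N P).set u.toNat ((P.length : Int) + 1) = mkL N (P ++ [u]) := by
  unfold mkL
  apply List.ext_getElem
  · simp
  intro i hi1 hi2
  simp only [List.length_map, List.length_range] at hi2
  rw [List.getElem_set]
  simp only [List.getElem_map, List.getElem_range]
  by_cases hiu : u.toNat = i
  · have : (i : Int) = u := by omega
    rw [if_pos hiu, this, posOf_append_self P u hu]
  · have : (i : Int) ≠ u := by omega
    rw [if_neg hiu, posOf_append_ne P u _ this]

theorem mkV_nil (N : Nat) : mkV N [] = List.replicate (N + 1) false := by
  simp [mkV]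

theorem mkL_nil (N : Nat) : mkL N [] = List.replicate (N + 1) 0 := by
  simp [mkL, posOf_nil]

-- A's local 'neighbors' list is the adjacency list filtered by the visited snapshot
theorem nbsA_eq (matrix : List (List Int)) (n : Int) (v : List Bool) (cur : Int) :
    bfsNbrsA matrix n v cur =
      (adjL matrix n cur).filter (fun u => decide (v.getD u.toNat false = false)) := by
  unfold bfsNbrsA adjL
  rw [PySem.List.foldl_append_ite_eq_filter, List.nil_append,
    PySem.List.sorted_eq_self_of_pairwise _ _
      (((PySem.List.pairwise_lt_pyRange_one 1 _).filter _).imp (fun h => le_of_lt h)),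
    List.filter_filter]
  apply List.filter_congr
  intro x hx
  simp [Bool.and_comm]

-- pre-filtering by the visited snapshot commutes out of A's marking fold
theorem foldMark_filter (l : List Int) (hl : l.Pairwise (· < ·)) (hpos : ∀ x ∈ l, (1:Int) ≤ x)
    (st : List Bool × List Int × Int × List Int) :
    (l.filter (fun u => decide (st.1.getD u.toNat false = false))).foldl bfsMarkA st =
      l.foldl bfsMarkA st := by
  induction l generalizing st with
  | nil => simp
  | cons u t ih =>
    have hu1 : (1:Int) ≤ u := hpos u (by simp)
    have hl' := List.pairwise_cons.mp hl
    by_cases hv : st.1.getD u.toNat false = false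
    · rw [List.filter_cons_of_pos (by simpa using hv)]
      simp only [List.foldl_cons]
      have hstep : ∀ x ∈ t, (bfsMarkA st u).1.getD x.toNat false = st.1.getD x.toNat false := by
        intro x hx
        have hlt : u < x := hl'.1 x hx
        have hne : u.toNat ≠ x.toNat := by omega
        unfold bfsMarkA
        split
        · simp only
          rw [List.getD_eq_getElem?_getD, List.getElem?_set_ne hne,
            ← List.getD_eq_getElem?_getD]
        · rfl
      have hfe : t.filter (fun x => decide (st.1.getD x.toNat false = false)) =
          t.filter (fun x => decide ((bfsMarkA st u).1.getD x.toNat false = false)) := by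
        apply List.filter_congr
        intro x hx
        rw [hstep x hx]
      rw [hfe]
      exact ih hl'.2 (fun x hx => hpos x (by simp [hx])) (bfsMarkA st u)
    · rw [List.filter_cons_of_neg (by simpa using hv)]
      simp only [List.foldl_cons]
      have hid : bfsMarkA st u = st := by
        unfold bfsMarkA
        rw [if_neg]
        rintro ⟨-, h2⟩
        exact hv h2
      rw [hid]
      exact ih hl'.2 (fun x hx => hpos x (by simp [hx])) st

-- one marking step with a queue prefix present
theorem markA_queue_append (v : List Bool) (l : List Int) (lab : Int) (p q : List Int)
    (u : Int) :
    bfsMarkA (v, l, lab, p ++ q) u =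
      ((bfsMarkA (v, l, lab, q) u).1, (bfsMarkA (v, l, lab, q) u).2.1,
       (bfsMarkA (v, l, lab, q) u).2.2.1, p ++ (bfsMarkA (v, l, lab, q) u).2.2.2) := by
  unfold bfsMarkA
  by_cases h : u.toNat < v.length ∧ v.getD u.toNat false = false
  · rw [if_pos h, if_pos h, List.append_assoc]
  · rw [if_neg h, if_neg h]

-- the marking fold only appends to the queue; a queue prefix passes through untouched
theorem foldMarkA_queue_append (us : List Int) (visited : List Bool) (labels : List Int)
    (label : Int) (p q : List Int) :
    us.foldl bfsMarkA (visited, labels, label, p ++ q) =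
      ((us.foldl bfsMarkA (visited, labels, label, q)).1,
       (us.foldl bfsMarkA (visited, labels, label, q)).2.1,
       (us.foldl bfsMarkA (visited, labels, label, q)).2.2.1,
       p ++ (us.foldl bfsMarkA (visited, labels, label, q)).2.2.2) := by
  induction us generalizing visited labels label q with
  | nil => simp
  | cons u t ih =>
    simp only [List.foldl_cons]
    rw [markA_queue_append]
    exact ih (bfsMarkA (visited, labels, label, q) u).1
      (bfsMarkA (visited, labels, label, q) u).2.1
      (bfsMarkA (visited, labels, label, q) u).2.2.1
      (bfsMarkA (visited, labels, label, q) u).2.2.2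

-- A's queue loop processes a frontier batch first, then loops on what that batch enqueued
theorem loopA_batch (matrix : List (List Int)) (n : Int) :
    ∀ (F N : List Int) (v : List Bool) (l : List Int) (lab : Int),
      bfsLoopA matrix n (F ++ N) v l lab =
        bfsLoopA matrix n (popFold matrix n F (v, l, lab, N)).2.2.2
          (popFold matrix n F (v, l, lab, N)).1 (popFold matrix n F (v, l, lab, N)).2.1
          (popFold matrix n F (v, l, lab, N)).2.2.1 := by
  intro F
  induction F with
  | nil => intro N v l lab; simp [popFold]
  | cons cur F ih =>
    intro N v l lab
    rw [List.cons_append]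
    conv_lhs => rw [bfsLoopA]
    rw [foldMarkA_queue_append]
    simp only
    rw [ih]
    rfl

-- B's inner fold never reads its nxt accumulator: it just appends
theorem hB_acc (L : List Int) : ∀ (seen acc : List Int),
    L.foldl hB (seen, acc) =
      ((L.foldl hB (seen, ([] : List Int))).1, acc ++ (L.foldl hB (seen, [])).2) := by
  induction L with
  | nil => intro seen acc; simp
  | cons u L ih =>
    intro seen acc
    simp only [List.foldl_cons]
    by_cases hu : u ∈ seen
    · simp only [hB, if_pos hu]
      exact ih seen acc
    · simp only [hB, if_neg hu]
      rw [ih (seen ++ [u]) (acc ++ [u]), ih (seen ++ [u]) ([] ++ [u])]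
      simp [List.append_assoc]

-- B's per-cur step is the hB-fold over the adjacency list
theorem bStep_eq (matrix : List (List Int)) (n : Int) (s : PySem.Set Int × List Int)
    (cur : Int) :
    bStep matrix n s cur = (adjL matrix n cur).foldl hB s := by
  unfold bStep adjL
  have hfun : (fun (st : PySem.Set Int × List Int) u =>
      if (matrix.getD (cur-1).toNat []).getD (u-1).toNat 0 = 1 ∧ u ∉ st.1 then
        (PySem.Set.add st.1 u, st.2 ++ [u])
      else st) =
      (fun (st : PySem.Set Int × List Int) u =>
        if (matrix.getD (cur-1).toNat []).getD (u-1).toNat 0 = 1 then hB st u else st) := by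
    funext st u
    by_cases hc : (matrix.getD (cur-1).toNat []).getD (u-1).toNat 0 = 1
    · rw [if_pos hc]
      by_cases hu : u ∈ st.1
      · rw [if_neg (fun h => h.2 hu)]
        unfold hB
        rw [if_pos hu]
      · rw [if_pos ⟨hc, hu⟩]
        unfold hB
        rw [if_neg hu, PySem.Set.add_of_not_mem hu]
    · rw [if_neg (fun h => hc h.1), if_neg hc]
  rw [hfun, PySem.List.foldl_ite_eq_foldl_filter]

theorem bStepFold_acc (matrix : List (List Int)) (n : Int) (F : List Int) :
    ∀ (seen acc : List Int),
      F.foldl (bStep matrix n) (seen, acc) =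
        ((F.foldl (bStep matrix n) (seen, ([] : List Int))).1,
         acc ++ (F.foldl (bStep matrix n) (seen, [])).2) := by
  induction F with
  | nil => intro seen acc; simp
  | cons c F ih =>
    intro seen acc
    simp only [List.foldl_cons, bStep_eq]
    rw [hB_acc (adjL matrix n c) seen acc, hB_acc (adjL matrix n c) seen []]
    set X := (adjL matrix n c).foldl hB (seen, ([] : List Int)) with hX
    dsimp only
    simp only [List.nil_append]
    rw [ih X.1 (acc ++ X.2), ih X.1 X.2]
    simp [List.append_assoc]

-- the parallel simulation of one marking fold: A on the abstraction, B on (seen, nxt)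
theorem markFold_sim (N : Nat) :
    ∀ (L : List Int) (seen P q : List Int),
      (∀ u ∈ L, 1 ≤ u ∧ u ≤ (N : Int)) →
      (∀ x : Int, x ∈ P ↔ x ∈ seen) → P.Nodup →
      L.foldl bfsMarkA (mkV N seen, mkL N P, ((P.length : Int) + 1), q)
          = (mkV N (L.foldl hB (seen, ([] : List Int))).1,
             mkL N (P ++ (L.foldl hB (seen, [])).2),
             (((P ++ (L.foldl hB (seen, [])).2).length : Int) + 1),
             q ++ (L.foldl hB (seen, [])).2)
        ∧ (L.foldl hB (seen, ([] : List Int))).1 = seen ++ (L.foldl hB (seen, [])).2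
        ∧ (P ++ (L.foldl hB (seen, [])).2).Nodup
        ∧ (∀ x : Int, x ∈ P ++ (L.foldl hB (seen, [])).2 ↔
            x ∈ (L.foldl hB (seen, ([] : List Int))).1) := by
  intro L
  induction L with
  | nil =>
    intro seen P q _ hm hnd
    refine ⟨by simp, by simp, by simpa using hnd, by simpa using hm⟩
  | cons u L ih =>
    intro seen P q hb hm hnd
    have hu := hb u List.mem_cons_self
    simp only [List.foldl_cons]
    by_cases hcase : u ∈ seen
    · have hmark : bfsMarkA (mkV N seen, mkL N P, ((P.length : Int) + 1), q) u =
          (mkV N seen, mkL N P, ((P.length : Int) + 1), q) := by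
        unfold bfsMarkA
        rw [if_neg]
        rintro ⟨-, h2⟩
        rw [mkV_getD N seen u hu.1 hu.2] at h2
        simp [hcase] at h2
      have hhb : hB (seen, ([] : List Int)) u = (seen, []) := by simp [hB, hcase]
      rw [hmark, hhb]
      exact ih seen P q (fun v hv => hb v (List.mem_cons_of_mem _ hv)) hm hnd
    · have huP : u ∉ P := fun h => hcase ((hm u).mp h)
      have hmark : bfsMarkA (mkV N seen, mkL N P, ((P.length : Int) + 1), q) u =
          (mkV N (seen ++ [u]), mkL N (P ++ [u]), (((P ++ [u]).length : Int) + 1),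
           q ++ [u]) := by
        unfold bfsMarkA
        rw [if_pos]
        · simp only
          rw [mkV_set N seen u hu.1 hu.2, mkL_set N P u hu.1 hu.2 huP,
            show ((P ++ [u]).length : Int) + 1 = (P.length : Int) + 1 + 1 by simp]
        · constructor
          · rw [mkV_length]; omega
          · rw [mkV_getD N seen u hu.1 hu.2]; simp [hcase]
      have hhb : hB (seen, ([] : List Int)) u = (seen ++ [u], [u]) := by
        simp [hB, hcase]
      rw [hmark, hhb, hB_acc L (seen ++ [u]) [u]]
      have hm' : ∀ x : Int, x ∈ P ++ [u] ↔ x ∈ seen ++ [u] := by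
        intro x; simp [hm x]
      have hnd' : (P ++ [u]).Nodup := by
        refine List.Nodup.append hnd (List.nodup_singleton u) ?_
        intro a ha hau
        rw [List.mem_singleton] at hau
        exact huP (hau ▸ ha)
      have hlen : (((P ++ [u]).length : Int) + 1) = ((P.length : Int) + 1) + 1 := by
        simp
      obtain ⟨h1, h2, h3, h4⟩ := ih (seen ++ [u]) (P ++ [u]) (q ++ [u])
        (fun v hv => hb v (List.mem_cons_of_mem _ hv)) hm' hnd'
      refine ⟨?_, ?_, ?_, ?_⟩
      · rw [h1]
        simp [List.append_assoc]
      · rw [h2]; simp [List.append_assoc]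
      · simpa [List.append_assoc] using h3
      · intro x
        have := h4 x
        simpa [List.append_assoc] using this

-- one whole frontier: A's pop-processing fold is B's bStep fold on the abstraction
theorem levelFold_sim (matrix : List (List Int)) (N : Nat) (hN : N = matrix.length) :
    ∀ (F : List Int) (seen P q : List Int),
      (∀ x : Int, x ∈ P ↔ x ∈ seen) → P.Nodup →
      popFold matrix (N : Int) F (mkV N seen, mkL N P, ((P.length : Int) + 1), q)
          = (mkV N (F.foldl (bStep matrix (N : Int)) (seen, ([] : List Int))).1,
             mkL N (P ++ (F.foldl (bStep matrix (N : Int)) (seen, [])).2),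
             (((P ++ (F.foldl (bStep matrix (N : Int)) (seen, [])).2).length : Int) + 1),
             q ++ (F.foldl (bStep matrix (N : Int)) (seen, [])).2)
        ∧ (F.foldl (bStep matrix (N : Int)) (seen, ([] : List Int))).1 =
            seen ++ (F.foldl (bStep matrix (N : Int)) (seen, [])).2
        ∧ (P ++ (F.foldl (bStep matrix (N : Int)) (seen, [])).2).Nodup
        ∧ (∀ x : Int, x ∈ P ++ (F.foldl (bStep matrix (N : Int)) (seen, [])).2 ↔
            x ∈ (F.foldl (bStep matrix (N : Int)) (seen, ([] : List Int))).1) := by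
  intro F
  induction F with
  | nil =>
    intro seen P q hm hnd
    refine ⟨by simp [popFold], by simp, by simpa using hnd, by simpa using hm⟩
  | cons cur F ih =>
    intro seen P q hm hnd
    have hpair : (adjL matrix (N : Int) cur).Pairwise (· < ·) :=
      (PySem.List.pairwise_lt_pyRange_one 1 _).filter _
    have hbnd : ∀ u ∈ adjL matrix (N : Int) cur, 1 ≤ u ∧ u ≤ (N : Int) := by
      intro u hu
      have := PySem.List.mem_pyRange_one.mp (List.mem_of_mem_filter hu)
      omega
    have hpop : popFold matrix (N : Int) (cur :: F) (mkV N seen, mkL N P,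
        ((P.length : Int) + 1), q) = popFold matrix (N : Int) F
          ((adjL matrix (N : Int) cur).foldl bfsMarkA
            (mkV N seen, mkL N P, ((P.length : Int) + 1), q)) := by
      unfold popFold
      simp only [List.foldl_cons]
      rw [nbsA_eq, foldMark_filter _ hpair (fun x hx => (hbnd x hx).1)]
    obtain ⟨m1, m2, m3, m4⟩ := markFold_sim N (adjL matrix (N : Int) cur) seen P q hbnd hm hnd
    set r1 := (adjL matrix (N : Int) cur).foldl hB (seen, ([] : List Int)) with hr1
    obtain ⟨h1, h2, h3, h4⟩ := ih r1.1 (P ++ r1.2) (q ++ r1.2) m4 m3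
    have hfold : (cur :: F).foldl (bStep matrix (N : Int)) (seen, ([] : List Int)) =
        ((F.foldl (bStep matrix (N : Int)) (r1.1, ([] : List Int))).1,
         r1.2 ++ (F.foldl (bStep matrix (N : Int)) (r1.1, [])).2) := by
      simp only [List.foldl_cons, bStep_eq]
      rw [show (adjL matrix (N : Int) cur).foldl hB (seen, ([] : List Int)) = r1 from rfl]
      rw [show r1 = (r1.1, r1.2) from rfl, bStepFold_acc]
    rw [hpop, m1, h1, hfold]
    refine ⟨by simp [List.append_assoc], ?_, ?_, ?_⟩
    · rw [h2, m2]; simp [List.append_assoc]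
    · simpa [List.append_assoc] using h3
    · intro x
      have := h4 x
      simpa [List.append_assoc] using this

-- the A-side measure only shrinks across a frontier batch
theorem popFold_measure (matrix : List (List Int)) (n : Int) (F : List Int) :
    ∀ (st : List Bool × List Int × Int × List Int),
      (popFold matrix n F st).1.count false + (popFold matrix n F st).2.2.2.length ≤
        st.1.count false + st.2.2.2.length := by
  induction F with
  | nil => intro st; simp [popFold]
  | cons cur F ih =>
    intro st
    unfold popFold
    simp only [List.foldl_cons]
    have h1 := bfsFoldMarkA_measure (bfsNbrsA matrix n st.1 cur) st
    have h2 := ih ((bfsNbrsA matrix n st.1 cur).foldl bfsMarkA st)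
    unfold popFold at h2
    omega

-- the component loops agree on the abstraction (fuel induction on A's measure)
theorem level_sim (matrix : List (List Int)) (N : Nat) (hN : N = matrix.length) :
    ∀ (M : Nat) (F seen P : List Int),
      (mkV N seen).count false + F.length ≤ M →
      (∀ x : Int, x ∈ P ↔ x ∈ seen) → P.Nodup →
      bfsLoopA matrix (N : Int) F (mkV N seen) (mkL N P) ((P.length : Int) + 1)
          = (mkV N (bLevels matrix (N : Int) seen P F).1,
             mkL N (bLevels matrix (N : Int) seen P F).2,
             (((bLevels matrix (N : Int) seen P F).2.length : Int) + 1))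
        ∧ (∀ x : Int, x ∈ (bLevels matrix (N : Int) seen P F).2 ↔
            x ∈ (bLevels matrix (N : Int) seen P F).1)
        ∧ (bLevels matrix (N : Int) seen P F).2.Nodup := by
  intro M
  induction M with
  | zero =>
    intro F seen P hM hm hnd
    have hF : F = [] := by
      cases F with
      | nil => rfl
      | cons a b => exfalso; simp only [List.length_cons] at hM; omega
    subst hF
    rw [bfsLoopA, bLevels]
    exact ⟨rfl, by simpa using hm, hnd⟩
  | succ M ih =>
    intro F seen P hM hm hnd
    cases F with
    | nil =>
      rw [bfsLoopA, bLevels]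
      exact ⟨rfl, by simpa using hm, hnd⟩
    | cons c F' =>
      have hbatch := loopA_batch matrix (N : Int) (c :: F') []
        (mkV N seen) (mkL N P) ((P.length : Int) + 1)
      rw [List.append_nil] at hbatch
      obtain ⟨l1, l2, l3, l4⟩ := levelFold_sim matrix N hN (c :: F') seen P [] hm hnd
      set r := (c :: F').foldl (bStep matrix (N : Int)) (seen, ([] : List Int)) with hr
      have hmeas := popFold_measure matrix (N : Int) (c :: F')
        (mkV N seen, mkL N P, ((P.length : Int) + 1), [])
      rw [l1] at hmeas
      simp only [List.length_nil, List.nil_append, List.length_cons] at hmeas hM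
      have hrec := ih r.2 r.1 (P ++ r.2) (by omega) l4 l3
      have hlev : bLevels matrix (N : Int) seen P (c :: F') =
          bLevels matrix (N : Int) r.1 (P ++ r.2) r.2 := by
        rw [bLevels]
      rw [hbatch, l1]
      simp only [List.nil_append]
      rw [hlev]
      exact ⟨hrec.1, hrec.2.1, hrec.2.2⟩

-- the outer start-vertex loops agree on the abstraction
theorem outer_sim (matrix : List (List Int)) (N : Nat) (hN : N = matrix.length) :
    ∀ (L : List Int) (seen P : List Int),
      (∀ v ∈ L, 1 ≤ v ∧ v ≤ (N : Int)) →
      (∀ x : Int, x ∈ P ↔ x ∈ seen) → P.Nodup →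
      L.foldl (fun st v =>
          if st.1.getD v.toNat false = false then
            bfsFromA matrix (N : Int) st.1 st.2.1 v st.2.2 else st)
        (mkV N seen, mkL N P, ((P.length : Int) + 1))
          = (mkV N (L.foldl (fun st start =>
                if start ∈ st.1 then st
                else bLevels matrix (N : Int) (PySem.Set.add st.1 start)
                  (st.2 ++ [start]) [start]) (seen, P)).1,
             mkL N (L.foldl (fun st start =>
                if start ∈ st.1 then st
                else bLevels matrix (N : Int) (PySem.Set.add st.1 start)
                  (st.2 ++ [start]) [start]) (seen, P)).2,
             (((L.foldl (fun st start =>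
                if start ∈ st.1 then st
                else bLevels matrix (N : Int) (PySem.Set.add st.1 start)
                  (st.2 ++ [start]) [start]) (seen, P)).2.length : Int) + 1))
        ∧ (∀ x : Int, x ∈ (L.foldl (fun st start =>
                if start ∈ st.1 then st
                else bLevels matrix (N : Int) (PySem.Set.add st.1 start)
                  (st.2 ++ [start]) [start]) (seen, P)).2 ↔
            x ∈ (L.foldl (fun st start =>
                if start ∈ st.1 then st
                else bLevels matrix (N : Int) (PySem.Set.add st.1 start)
                  (st.2 ++ [start]) [start]) (seen, P)).1)
        ∧ (L.foldl (fun st start =>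
                if start ∈ st.1 then st
                else bLevels matrix (N : Int) (PySem.Set.add st.1 start)
                  (st.2 ++ [start]) [start]) (seen, P)).2.Nodup := by
  intro L
  induction L with
  | nil =>
    intro seen P _ hm hnd
    exact ⟨rfl, hm, hnd⟩
  | cons v L ih =>
    intro seen P hb hm hnd
    have hv := hb v List.mem_cons_self
    simp only [List.foldl_cons]
    by_cases hcase : v ∈ seen
    · rw [if_neg (by rw [mkV_getD N seen v hv.1 hv.2]; simp [hcase]), if_pos hcase]
      exact ih seen P (fun w hw => hb w (List.mem_cons_of_mem _ hw)) hm hnd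
    · have hvP : v ∉ P := fun h => hcase ((hm v).mp h)
      rw [if_pos (by rw [mkV_getD N seen v hv.1 hv.2]; simp [hcase]), if_neg hcase]
      have hfrom : bfsFromA matrix (N : Int) (mkV N seen) (mkL N P) v
          ((P.length : Int) + 1) =
          bfsLoopA matrix (N : Int) [v] (mkV N (seen ++ [v])) (mkL N (P ++ [v]))
            (((P ++ [v]).length : Int) + 1) := by
        unfold bfsFromA
        rw [mkV_set N seen v hv.1 hv.2, mkL_set N P v hv.1 hv.2 hvP,
          show (((P ++ [v]).length : Int) + 1) = ((P.length : Int) + 1) + 1 by simp]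
      have hm' : ∀ x : Int, x ∈ P ++ [v] ↔ x ∈ seen ++ [v] := by
        intro x; simp [hm x]
      have hnd' : (P ++ [v]).Nodup := by
        refine List.Nodup.append hnd (List.nodup_singleton v) ?_
        intro a ha hav
        rw [List.mem_singleton] at hav
        exact hvP (hav ▸ ha)
      obtain ⟨e1, e2, e3⟩ := level_sim matrix N hN
        ((mkV N (seen ++ [v])).count false + 1) [v] (seen ++ [v]) (P ++ [v])
        (by simp) hm' hnd'
      rw [hfrom, e1, PySem.Set.add_of_not_mem hcase]
      exact ih (bLevels matrix (N : Int) (seen ++ [v]) (P ++ [v]) [v]).1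
        (bLevels matrix (N : Int) (seen ++ [v]) (P ++ [v]) [v]).2
        (fun w hw => hb w (List.mem_cons_of_mem _ hw)) e2 e3

-- the dict {v: i+1 for i, v in enumerate(order)} looks up the 1-based position
theorem dictPos (P : List Int) (hnd : P.Nodup) (v : Int) :
    ((PySem.List.enumerate P).foldl (fun d p => d.insert p.2 (p.1 + 1))
        (PySem.Dict.empty : PySem.Dict Int Int)).getD v 0 = posOf P v := by
  induction P using List.reverseRecOn with
  | nil => simp [posOf_nil, PySem.Dict.getD_empty]
  | append_singleton P u ih =>
    have hndP : P.Nodup := (List.nodup_append.mp hnd).1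
    have huP : u ∉ P := by
      intro h
      have hd := List.nodup_append.mp hnd
      exact hd.2.2 u h u (List.mem_singleton_self u) rfl
    rw [PySem.List.enumerate_append, List.foldl_append]
    simp only [PySem.List.enumerate_cons, PySem.List.enumerate_nil, List.foldl_cons,
      List.foldl_nil, zero_add]
    rw [PySem.Dict.getD_insert]
    by_cases hvu : v = u
    · rw [if_pos hvu, hvu, posOf_append_self P u huP]
    · rw [if_neg hvu, posOf_append_ne P u v hvu, ih hndP]

-- ===== VERDICT (by name: the statement is the Claim_ definition above) =====
theorem bfs_spec : Claim_equal_bfs := by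
  unfold Claim_equal_bfs
  intro matrix hdom hpre
  unfold Spec_bfs bfs bfs_alt
  dsimp only
  simp only [PySem.Set.empty]
  obtain ⟨e1, e2, e3⟩ := outer_sim matrix matrix.length rfl
    (PySem.List.pyRange 1 ((matrix.length : Int) + 1) 1) [] []
    (fun v hv => by
      have := PySem.List.mem_pyRange_one.mp hv
      omega)
    (by simp) List.nodup_nil
  have hinit : (List.replicate (matrix.length + 1) false,
      List.replicate (matrix.length + 1) 0, (1 : Int)) =
      (mkV matrix.length ([] : List Int), mkL matrix.length ([] : List Int),
        ((([] : List Int).length : Int) + 1)) := by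
    rw [mkV_nil, mkL_nil]
    simp
  rw [hinit, e1]
  set R := (PySem.List.pyRange 1 ((matrix.length : Int) + 1) 1).foldl (fun st start =>
      if start ∈ st.1 then st
      else bLevels matrix (matrix.length : Int) (PySem.Set.add st.1 start)
        (st.2 ++ [start]) [start]) (([] : PySem.Set Int), ([] : List Int)) with hR
  dsimp only
  rw [PySem.List.slice_from _ (by norm_num : (0:Int) ≤ 1)]
  apply List.ext_getElem
  · rw [List.length_drop, mkL_length, List.length_map, PySem.List.length_pyRange_one]
    omega
  intro i hi1 hi2
  rw [List.getElem_drop]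
  unfold mkL
  rw [List.getElem_map]
  rw [List.length_map, PySem.List.length_pyRange_one] at hi2
  have hgr : (PySem.List.pyRange 1 ((matrix.length : Int) + 1) 1)[i]'(by
      rw [PySem.List.length_pyRange_one]; omega) = 1 + (i : Int) :=
    PySem.List.getElem_pyRange_one 1 _ i _
  rw [List.getElem_map, hgr, dictPos R.2 e3, List.getElem_range]
  congr 1
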